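-- pv_equiv track=rewrite | github.com/badredinedhaoui/Behavior-driven-risk-assessment-with-neo4j | src/bayesian_engine.py | _determine_attack_stage
-- ===== SOURCE A (Python) =====
-- from typing import Dict, List, Set, Tuple, Optional
--
-- TACTICS = [
--     'reconnaissance',
--     'resource-development',
--     'initial-access',
--     'execution',
--     'persistence',
--     'privilege-escalation',
--     'defense-evasion',
--     'credential-access',
--     'discovery',
--     'lateral-movement',
--     'collection',
--     'command-and-control',
--     'exfiltration',
--     'impact'
-- ]
--
-- def _determine_attack_stage(observed: List[str]) -> str:
--     """Determine current attack stage."""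
--     if not observed:
--         return "No activity"
--
--     positions = [TACTICS.index(t) for t in observed if t in TACTICS]
--     max_pos = max(positions) if positions else 0
--
--     if max_pos >= 12:
--         return "Final Stage (Exfil/Impact imminent)"
--     elif max_pos >= 9:
--         return "Late Stage (Lateral Movement/Collection)"
--     elif max_pos >= 6:
--         return "Mid Stage (Privilege Escalation/Defense Evasion)"
--     elif max_pos >= 3:
--         return "Early Stage (Initial Access/Execution)"
--     else:
--         return "Reconnaissance/Preparation"
-- ===== SOURCE B (Python) =====
-- from typing import Dict, List, Set, Tuple, Optional
--
-- TACTICS = [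
--     'reconnaissance',
--     'resource-development',
--     'initial-access',
--     'execution',
--     'persistence',
--     'privilege-escalation',
--     'defense-evasion',
--     'credential-access',
--     'discovery',
--     'lateral-movement',
--     'collection',
--     'command-and-control',
--     'exfiltration',
--     'impact'
-- ]
--
-- # Stage bands, ordered highest-first: (set of tactics in the band, label).
-- _BANDS = [
--     (set(TACTICS[12:]), "Final Stage (Exfil/Impact imminent)"),
--     (set(TACTICS[9:12]), "Late Stage (Lateral Movement/Collection)"),
--     (set(TACTICS[6:9]), "Mid Stage (Privilege Escalation/Defense Evasion)"),
--     (set(TACTICS[3:6]), "Early Stage (Initial Access/Execution)"),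
-- ]
--
--
-- def _determine_attack_stage(observed: List[str]) -> str:
--     """Determine current attack stage."""
--     if not observed:
--         return "No activity"
--     for band, label in _BANDS:
--         if any(t in band for t in observed):
--             return label
--     return "Reconnaissance/Preparation"
-- ===== Notes on version B (the rewrite author's own statement) =====
-- stated objective: simpler
-- what changed: Instead of computing every observed tactic's index and taking the max, B scans precomputed stage bands (sets of tactic names) highest-first and returns the first band label any observed tactic falls into; no positions list and no max are ever computed.
import Mathlib
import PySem

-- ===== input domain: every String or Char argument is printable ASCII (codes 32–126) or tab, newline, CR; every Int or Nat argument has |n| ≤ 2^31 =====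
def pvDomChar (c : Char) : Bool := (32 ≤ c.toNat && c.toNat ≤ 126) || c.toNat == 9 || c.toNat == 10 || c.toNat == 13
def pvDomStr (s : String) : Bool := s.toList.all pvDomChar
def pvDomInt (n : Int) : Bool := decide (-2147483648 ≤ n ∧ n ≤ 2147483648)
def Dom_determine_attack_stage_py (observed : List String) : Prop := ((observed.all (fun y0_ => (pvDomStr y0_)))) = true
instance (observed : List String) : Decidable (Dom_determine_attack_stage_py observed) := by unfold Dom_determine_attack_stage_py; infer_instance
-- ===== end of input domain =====

-- B replaces the index/max computation by a highest-first scan of precomputed stage bands (sets of tactic names): simpler, no positions list and no max.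


-- ===== PORT A =====
-- module constant TACTICS
def pvTactics : List String :=
  ["reconnaissance", "resource-development", "initial-access", "execution",
   "persistence", "privilege-escalation", "defense-evasion", "credential-access",
   "discovery", "lateral-movement", "collection", "command-and-control",
   "exfiltration", "impact"]

def determine_attack_stage_py (observed : List String) : String :=
  if observed = [] then "No activity" else
  let positions : List Nat :=
    (observed.filter (fun t => pvTactics.contains t)).map
      (fun t => (PySem.List.index? pvTactics t).getD 0)
      -- TACTICS.index(t): index? is always `some` here, the filter keeps only members of pvTactics
  let max_pos : Nat :=
    if positions = [] then 0 else (PySem.List.max? positions (fun y => y)).getD 0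
  if 12 ≤ max_pos then "Final Stage (Exfil/Impact imminent)"
  else if 9 ≤ max_pos then "Late Stage (Lateral Movement/Collection)"
  else if 6 ≤ max_pos then "Mid Stage (Privilege Escalation/Defense Evasion)"
  else if 3 ≤ max_pos then "Early Stage (Initial Access/Execution)"
  else "Reconnaissance/Preparation"

-- ===== PORT B =====
-- _BANDS: (set of the tactics in the band, label), highest stage first
def pvBands : List (PySem.Set String × String) :=
  [ (PySem.Set.ofList (PySem.List.slice pvTactics (some 12) none),
      "Final Stage (Exfil/Impact imminent)"),
    (PySem.Set.ofList (PySem.List.slice pvTactics (some 9) (some 12)),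
      "Late Stage (Lateral Movement/Collection)"),
    (PySem.Set.ofList (PySem.List.slice pvTactics (some 6) (some 9)),
      "Mid Stage (Privilege Escalation/Defense Evasion)"),
    (PySem.Set.ofList (PySem.List.slice pvTactics (some 3) (some 6)),
      "Early Stage (Initial Access/Execution)") ]

def pvStageLoop (observed : List String) : List (PySem.Set String × String) → String
  | [] => "Reconnaissance/Preparation"
  | (band, label) :: rest =>
      if observed.any (fun t => PySem.Set.contains band t) then label
      else pvStageLoop observed rest

def determine_attack_stage_py_alt (observed : List String) : String :=
  if observed = [] then "No activity" else pvStageLoop observed pvBands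

-- ===== PRECONDITION & SPEC =====
def Spec_determine_attack_stage_py (observed : List String) (out : String) : Prop := out = determine_attack_stage_py_alt observed
instance (observed : List String) (out : String) : Decidable (Spec_determine_attack_stage_py observed out) := by unfold Spec_determine_attack_stage_py; infer_instance

-- ===== CLAIM (what is proved, stated in full; the proofs are below) =====
def Claim_equal_determine_attack_stage_py : Prop := ∀ (observed : List String), Dom_determine_attack_stage_py observed → Spec_determine_attack_stage_py observed (determine_attack_stage_py observed)

-- ===== LEMMAS AND PROOFS =====

-- `max(positions) if positions else 0` is ≥ k (k > 0) iff some position is ≥ k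
theorem pvMax_ge (l : List Nat) (k : Nat) (hk : 0 < k) :
    (k ≤ (if l = [] then 0 else (PySem.List.max? l (fun y => y)).getD 0)) ↔ ∃ x ∈ l, k ≤ x := by
  cases l with
  | nil => simp; omega
  | cons x t =>
    rw [if_neg (by simp), PySem.List.max?_id_cons]
    simp only [Option.getD_some]
    constructor
    · intro hle
      rcases PySem.List.foldl_max_mem t x with h | h
      · exact ⟨x, by simp, h ▸ hle⟩
      · exact ⟨_, List.mem_cons_of_mem _ h, hle⟩
    · rintro ⟨y, hy, hky⟩
      rcases List.mem_cons.mp hy with rfl | hyt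
      · exact le_trans hky (PySem.List.le_foldl_max t y).1
      · exact le_trans hky ((PySem.List.le_foldl_max t x).2 y hyt)

-- a string has TACTICS-index ≥ k iff it lies in TACTICS[k:]
theorem pvPt (t : String) (k : Nat) (hks : k = 12 ∨ k = 9 ∨ k = 6 ∨ k = 3) :
    (pvTactics.contains t = true ∧ k ≤ (PySem.List.index? pvTactics t).getD 0)
      ↔ t ∈ pvTactics.drop k := by
  by_cases h : t ∈ pvTactics
  · rcases hks with rfl | rfl | rfl | rfl <;>
      (simp only [pvTactics] at h; fin_cases h <;> decide)
  · constructor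
    · rintro ⟨h1, -⟩
      exact absurd (by simpa using h1) h
    · intro hd
      exact absurd (List.mem_of_mem_drop hd) h

-- a string lies in a middle band TACTICS[k:j] iff its index is in [k, j)
theorem pvSplit (t : String) (k j : Int) (kn jn : Nat)
    (hks : k = 9 ∧ j = 12 ∧ kn = 9 ∧ jn = 12 ∨ k = 6 ∧ j = 9 ∧ kn = 6 ∧ jn = 9 ∨ k = 3 ∧ j = 6 ∧ kn = 3 ∧ jn = 6) :
    t ∈ PySem.List.slice pvTactics (some k) (some j)
      ↔ t ∈ pvTactics.drop kn ∧ t ∉ pvTactics.drop jn := by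
  by_cases h : t ∈ pvTactics
  · rcases hks with ⟨rfl, rfl, rfl, rfl⟩ | ⟨rfl, rfl, rfl, rfl⟩ | ⟨rfl, rfl, rfl, rfl⟩ <;>
      (simp only [pvTactics] at h; fin_cases h <;> decide)
  · constructor
    · intro hc
      exact absurd (PySem.List.mem_of_mem_slice _ _ _ hc) h
    · rintro ⟨hd, -⟩
      exact absurd (List.mem_of_mem_drop hd) h

-- A's branch test `k ≤ max_pos` says: some observed tactic has index ≥ k
theorem pvA_ge (observed : List String) (k : Nat) (hk : 0 < k)
    (hks : k = 12 ∨ k = 9 ∨ k = 6 ∨ k = 3) :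
    (k ≤ (if ((observed.filter (fun t => pvTactics.contains t)).map
              (fun t => (PySem.List.index? pvTactics t).getD 0)) = [] then 0
          else (PySem.List.max? ((observed.filter (fun t => pvTactics.contains t)).map
              (fun t => (PySem.List.index? pvTactics t).getD 0)) (fun y => y)).getD 0))
      ↔ ∃ t ∈ observed, t ∈ pvTactics.drop k := by
  rw [pvMax_ge _ k hk]
  simp only [List.mem_map, List.mem_filter]
  constructor
  · rintro ⟨x, ⟨t, ⟨ht, hp⟩, rfl⟩, hkx⟩
    exact ⟨t, ht, (pvPt t k hks).mp ⟨hp, hkx⟩⟩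
  · rintro ⟨t, ht, hd⟩
    rcases (pvPt t k hks).mpr hd with ⟨hp, hkx⟩
    exact ⟨_, ⟨t, ⟨ht, hp⟩, rfl⟩, hkx⟩

-- ===== VERDICT (by name: the statement is the Claim_ definition above) =====
set_option maxHeartbeats 10000000 in
theorem determine_attack_stage_py_spec : Claim_equal_determine_attack_stage_py := by
  intro observed _
  unfold Spec_determine_attack_stage_py determine_attack_stage_py determine_attack_stage_py_alt
  by_cases hobs : observed = []
  · simp [hobs]
  · rw [if_neg hobs, if_neg hobs]
    have hset : ∀ (l : List String) (t : String),
        (PySem.Set.contains (PySem.Set.ofList l) t = true) ↔ t ∈ l := by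
      intro l t
      simp [PySem.Set.contains, PySem.Set.mem_ofList]
    have hb12 : PySem.List.slice pvTactics (some 12) none = pvTactics.drop 12 := by decide
    have h12 := pvA_ge observed 12 (by omega) (Or.inl rfl)
    have h9 := pvA_ge observed 9 (by omega) (Or.inr (Or.inl rfl))
    have h6 := pvA_ge observed 6 (by omega) (Or.inr (Or.inr (Or.inl rfl)))
    have h3 := pvA_ge observed 3 (by omega) (Or.inr (Or.inr (Or.inr rfl)))
    simp only [pvBands, pvStageLoop, List.any_eq_true, hset, hb12, h12, h9, h6, h3]
    by_cases e12 : ∃ t ∈ observed, t ∈ pvTactics.drop 12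
    · rw [if_pos e12, if_pos e12]
    · rw [if_neg e12, if_neg e12]
      by_cases e9 : ∃ t ∈ observed, t ∈ pvTactics.drop 9
      · obtain ⟨t, ht, hd⟩ := e9
        rw [if_pos (show ∃ t ∈ observed, t ∈ pvTactics.drop 9 from ⟨t, ht, hd⟩),
            if_pos (show ∃ t ∈ observed, t ∈ PySem.List.slice pvTactics (some 9) (some 12) from
              ⟨t, ht, (pvSplit t 9 12 9 12 (Or.inl ⟨rfl, rfl, rfl, rfl⟩)).mpr ⟨hd, fun hc => e12 ⟨t, ht, hc⟩⟩⟩)]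
      · rw [if_neg e9,
            if_neg (show ¬ ∃ t ∈ observed, t ∈ PySem.List.slice pvTactics (some 9) (some 12) from
              fun ⟨t, ht, hw⟩ => e9 ⟨t, ht, ((pvSplit t 9 12 9 12 (Or.inl ⟨rfl, rfl, rfl, rfl⟩)).mp hw).1⟩)]
        by_cases e6 : ∃ t ∈ observed, t ∈ pvTactics.drop 6
        · obtain ⟨t, ht, hd⟩ := e6
          rw [if_pos (show ∃ t ∈ observed, t ∈ pvTactics.drop 6 from ⟨t, ht, hd⟩),
              if_pos (show ∃ t ∈ observed, t ∈ PySem.List.slice pvTactics (some 6) (some 9) from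
                ⟨t, ht, (pvSplit t 6 9 6 9 (Or.inr (Or.inl ⟨rfl, rfl, rfl, rfl⟩))).mpr ⟨hd, fun hc => e9 ⟨t, ht, hc⟩⟩⟩)]
        · rw [if_neg e6,
              if_neg (show ¬ ∃ t ∈ observed, t ∈ PySem.List.slice pvTactics (some 6) (some 9) from
                fun ⟨t, ht, hw⟩ => e6 ⟨t, ht, ((pvSplit t 6 9 6 9 (Or.inr (Or.inl ⟨rfl, rfl, rfl, rfl⟩))).mp hw).1⟩)]
          by_cases e3 : ∃ t ∈ observed, t ∈ pvTactics.drop 3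
          · obtain ⟨t, ht, hd⟩ := e3
            rw [if_pos (show ∃ t ∈ observed, t ∈ pvTactics.drop 3 from ⟨t, ht, hd⟩),
                if_pos (show ∃ t ∈ observed, t ∈ PySem.List.slice pvTactics (some 3) (some 6) from
                  ⟨t, ht, (pvSplit t 3 6 3 6 (Or.inr (Or.inr ⟨rfl, rfl, rfl, rfl⟩))).mpr ⟨hd, fun hc => e6 ⟨t, ht, hc⟩⟩⟩)]
          · rw [if_neg e3,
                if_neg (show ¬ ∃ t ∈ observed, t ∈ PySem.List.slice pvTactics (some 3) (some 6) from
                  fun ⟨t, ht, hw⟩ => e3 ⟨t, ht, ((pvSplit t 3 6 3 6 (Or.inr (Or.inr ⟨rfl, rfl, rfl, rfl⟩))).mp hw).1⟩)]
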